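-- pv_equiv track=rewrite | github.com/Risha74/Python | 15_4_1.py | mostLenght
-- ===== SOURCE A (Python) =====
-- def mostLenght(text):
--     alpha = 'abcdefghijklmnopqrstuvwxyz'
--     english_word = []
--     for word in text:
--         for char in word:
--             if char in alpha and word not in english_word:
--                 english_word.append(word)
--             break
--     max_word = ''
--     for word in english_word:
--         if len(word) > len(max_word):
--             max_word = word
--     return max_word
-- ===== SOURCE B (Python) =====
-- def mostLenght(text):
--     alpha = 'abcdefghijklmnopqrstuvwxyz'
--     candidates = [w for w in text if w and w[0] in alpha]
--     if not candidates:
--         return ''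
--     return sorted(candidates, key=lambda w: -len(w))[0]
-- ===== Notes on version B (the rewrite author's own statement) =====
-- stated objective: faster
-- what changed: Replaces A's dedup-list accumulation (quadratic 'word not in english_word' membership scan) plus a running strict-max loop with a single filter comprehension followed by a stable sort on negative length and indexing element 0; the dedup pass is dropped because it cannot affect which longest word is returned.
import Mathlib
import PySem

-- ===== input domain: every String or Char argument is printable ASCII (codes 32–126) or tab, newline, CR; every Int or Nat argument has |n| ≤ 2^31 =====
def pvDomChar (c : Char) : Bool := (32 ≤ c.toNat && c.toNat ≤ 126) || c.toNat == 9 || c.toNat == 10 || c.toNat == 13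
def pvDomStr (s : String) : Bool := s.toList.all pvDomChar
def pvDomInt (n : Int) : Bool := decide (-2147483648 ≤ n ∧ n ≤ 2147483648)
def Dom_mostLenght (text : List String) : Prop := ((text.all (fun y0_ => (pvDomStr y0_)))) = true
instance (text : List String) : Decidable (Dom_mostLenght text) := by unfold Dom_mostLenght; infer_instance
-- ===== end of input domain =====

-- B replaces A's dedup-list build plus running strict-max loop by a filter, a stable sort on negative length and taking element 0; same return value, the dedup pass is dropped as irrelevant to which longest word wins.


-- ===== PORT A =====
def mostLenght (text : List String) : String :=
  let alpha := "abcdefghijklmnopqrstuvwxyz"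
  let english_word := text.foldl (fun acc word =>
    match word.toList with
    | [] => acc
    | c :: _ =>
      if alpha.toList.contains c ∧ ¬ acc.contains word then acc ++ [word] else acc)
    ([] : List String)
  english_word.foldl (fun max_word word =>
    if PySem.Str.len max_word < PySem.Str.len word then word else max_word) ""

def mostLenght_alt (text : List String) : String :=
  let alpha := "abcdefghijklmnopqrstuvwxyz"
  let candidates := text.filter (fun w =>
    match w.toList with
    | [] => false
    | c :: _ => alpha.toList.contains c)
  if candidates = [] then ""
  else (PySem.List.sorted candidates (fun w => -(PySem.Str.len w)) false).headD ""


-- ===== PRECONDITION & SPEC =====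
def Spec_mostLenght (text : List String) (out : String) : Prop := out = mostLenght_alt text
instance (text : List String) (out : String) : Decidable (Spec_mostLenght text out) := by unfold Spec_mostLenght; infer_instance

-- ===== CLAIM (what is proved, stated in full; the proofs are below) =====
def Claim_equal_mostLenght : Prop := ∀ (text : List String), Dom_mostLenght text → Spec_mostLenght text (mostLenght text)

-- ===== LEMMAS AND PROOFS =====

def pvStep (m w : String) : String := if PySem.Str.len m < PySem.Str.len w then w else m

def pvP (w : String) : Bool :=
  match w.toList with
  | [] => false
  | c :: _ => "abcdefghijklmnopqrstuvwxyz".toList.contains c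

theorem pvA_eq (text : List String) :
    mostLenght text = ((text.filter pvP).foldl
      (fun a w => if a.contains w then a else a ++ [w]) []).foldl pvStep "" := by
  unfold mostLenght
  simp only []
  rw [show (fun (max_word word : String) =>
      if PySem.Str.len max_word < PySem.Str.len word then word else max_word) = pvStep from rfl]
  congr 1
  refine Eq.trans (PySem.List.foldl_congr_mem text _ (fun acc w =>
      if pvP w = true then (if acc.contains w then acc else acc ++ [w]) else acc) []
    (by
      intro acc w _
      unfold pvP
      rcases hw : w.toList with _ | ⟨c, cs⟩ <;> simp only [hw] <;>
        (split_ifs <;> simp_all)) : _ = _) ?_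
  exact PySem.List.foldl_if_eq_foldl_filter _ _ _ _

theorem pvStep_bounds (l : List String) (m : String) :
    PySem.Str.len m ≤ PySem.Str.len (l.foldl pvStep m) ∧
    ∀ x ∈ l, PySem.Str.len x ≤ PySem.Str.len (l.foldl pvStep m) := by
  induction l generalizing m with
  | nil => exact ⟨le_refl _, by simp⟩
  | cons y t ih =>
    have h1 := (ih (pvStep m y)).1
    have h2 := (ih (pvStep m y)).2
    have hy : PySem.Str.len m ≤ PySem.Str.len (pvStep m y) ∧
        PySem.Str.len y ≤ PySem.Str.len (pvStep m y) := by
      unfold pvStep; split_ifs with h <;> constructor <;> omega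
    refine ⟨le_trans hy.1 h1, ?_⟩
    intro x hx
    rcases List.mem_cons.mp hx with rfl | hx
    · exact le_trans hy.2 h1
    · exact h2 x hx

theorem pvStep_eq_left (m w : String) (h : PySem.Str.len w ≤ PySem.Str.len m) :
    pvStep m w = m := by
  unfold pvStep
  rw [if_neg (by omega)]

theorem pvDedup_max (l : List String) (acc : List String) :
    ((l.foldl (fun a w => if a.contains w then a else a ++ [w]) acc).foldl pvStep "") =
      l.foldl pvStep (acc.foldl pvStep "") := by
  induction l generalizing acc with
  | nil => rfl
  | cons w t ih =>
    simp only [List.foldl_cons]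
    rw [ih]
    congr 1
    by_cases hw : acc.contains w
    · rw [if_pos hw]
      have hmem : w ∈ acc := by simpa using hw
      have hle := (pvStep_bounds acc "").2 w hmem
      exact (pvStep_eq_left _ _ hle).symm
    · rw [if_neg hw, List.foldl_append, List.foldl_cons, List.foldl_nil]
theorem pvSorted_head (l : List String) (m : String) (t : List String)
    (h : PySem.List.sorted l (fun w => -(PySem.Str.len w)) false = m :: t) :
    l.foldl pvStep "" = m := by
  induction l using List.reverseRecOn generalizing m t with
  | nil =>
    rw [PySem.List.sorted_eq_foldl_insertBy] at h
    simp at h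
  | append_singleton l' x ih =>
    rw [PySem.List.sorted_eq_foldl_insertBy, List.foldl_append, List.foldl_cons, List.foldl_nil,
      ← PySem.List.sorted_eq_foldl_insertBy] at h
    rw [List.foldl_append, List.foldl_cons, List.foldl_nil]
    rcases hs : PySem.List.sorted l' (fun w => -(PySem.Str.len w)) false with _ | ⟨m', t'⟩
    · rw [hs] at h
      simp only [PySem.List.insertBy] at h
      have hl' : l' = [] := (PySem.List.sorted_eq_nil_iff _ _ _).mp hs
      subst hl'
      cases h
      simp only [List.foldl_nil]
      unfold pvStep
      split_ifs with hlt
      · rfl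
      · have h0 : x.toList.length = 0 := by
          have hz : PySem.Str.len "" = 0 := by decide
          rw [hz] at hlt
          simp only [PySem.Str.len_eq] at hlt
          omega
        exact (String.toList_eq_nil_iff.mp (List.eq_nil_of_length_eq_zero h0)).symm
    · rw [hs] at h
      have hm' := ih m' t' hs
      rw [hm']
      simp only [PySem.List.insertBy] at h
      by_cases hb : (-(PySem.Str.len x) : Int) < -(PySem.Str.len m')
      · rw [if_pos (by simpa using hb)] at h
        cases h
        unfold pvStep
        rw [if_pos (by simp only [PySem.Str.len_eq] at hb ⊢; omega)]
      · rw [if_neg (by simpa using hb)] at h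
        cases h
        unfold pvStep
        rw [if_neg (by simp only [PySem.Str.len_eq] at hb ⊢; omega)]

theorem pvFinal (text : List String) : mostLenght text = mostLenght_alt text := by
  rw [pvA_eq, pvDedup_max, List.foldl_nil]
  unfold mostLenght_alt
  simp only []
  have hf : (text.filter (fun w =>
      match w.toList with
      | [] => false
      | c :: _ => "abcdefghijklmnopqrstuvwxyz".toList.contains c)) = text.filter pvP := rfl
  rw [hf]
  by_cases hc : text.filter pvP = []
  · rw [if_pos hc, hc, List.foldl_nil]
  · rw [if_neg hc]
    rcases hs : PySem.List.sorted (text.filter pvP) (fun w => -(PySem.Str.len w)) false with _ | ⟨m, t⟩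
    · exact absurd ((PySem.List.sorted_eq_nil_iff _ _ _).mp hs) hc
    · rw [List.headD_cons]
      exact pvSorted_head _ m t hs

-- ===== VERDICT (by name: the statement is the Claim_ definition above) =====
theorem mostLenght_spec : Claim_equal_mostLenght := by
  intro text _
  unfold Spec_mostLenght
  exact pvFinal text
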